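-- pv_equiv track=rewrite | github.com/alaouiib/DS_and_Algorithms_Training | is_first_come_first_served.py | is_first_come_first_served
-- ===== SOURCE A (Python) =====
-- def is_first_come_first_served(take_out_orders, dine_in_orders, served_orders):
--
--     # Check if we're serving orders first-come, first-served
--     if(len(served_orders) == 0):
--         return True
--
--     if(len(take_out_orders) and served_orders[0] == take_out_orders[0]):
--
--         return is_first_come_first_served(take_out_orders[1:], dine_in_orders, served_orders[1:])
--     elif(len(dine_in_orders) and served_orders[0] == dine_in_orders[0]):
--         return is_first_come_first_served(take_out_orders, dine_in_orders[1:], served_orders[1:])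
--
--     else:
--         return False
-- ===== SOURCE B (Python) =====
-- def is_first_come_first_served(take_out_orders, dine_in_orders, served_orders):
--     # Iterative two-pointer single pass (no slicing, no recursion), O(n).
--     i = 0
--     j = 0
--     for order in served_orders:
--         if i < len(take_out_orders) and order == take_out_orders[i]:
--             i += 1
--         elif j < len(dine_in_orders) and order == dine_in_orders[j]:
--             j += 1
--         else:
--             return False
--     return True
-- ===== Notes on version B (the rewrite author's own statement) =====
-- stated objective: faster
-- what changed: Replaced the recursive implementation that slices all three lists on every step with an iterative single pass keeping two index pointers into the untouched queues.
import Mathlib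
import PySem

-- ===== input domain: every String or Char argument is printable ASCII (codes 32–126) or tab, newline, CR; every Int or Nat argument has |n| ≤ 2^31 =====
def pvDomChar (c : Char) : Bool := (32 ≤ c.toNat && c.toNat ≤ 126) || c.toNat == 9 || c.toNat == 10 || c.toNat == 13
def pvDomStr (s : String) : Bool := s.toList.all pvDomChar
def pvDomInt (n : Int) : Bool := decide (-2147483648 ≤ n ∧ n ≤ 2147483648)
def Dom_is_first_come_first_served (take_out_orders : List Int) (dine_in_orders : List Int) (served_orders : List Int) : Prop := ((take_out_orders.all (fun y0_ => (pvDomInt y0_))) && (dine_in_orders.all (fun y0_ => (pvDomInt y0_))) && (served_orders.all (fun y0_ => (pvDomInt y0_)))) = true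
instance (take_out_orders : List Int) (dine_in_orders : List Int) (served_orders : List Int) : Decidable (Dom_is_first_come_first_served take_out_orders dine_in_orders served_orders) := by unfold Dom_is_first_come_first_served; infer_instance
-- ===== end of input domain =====

-- B replaces A's slicing recursion by an iterative two-pointer single pass (faster in a timing run: O(n) vs O(n^2)); return values proved equal on all inputs.

-- ===== PORT A =====
-- A: recursion on served_orders; prefer the take-out queue's head, else dine-in, else False.
def is_first_come_first_served (take_out_orders : List Int) (dine_in_orders : List Int) (served_orders : List Int) : Bool :=
  match served_orders with
  | [] => true
  | s0 :: srest =>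
    match take_out_orders, dine_in_orders with
    | t0 :: trest, d =>
      if s0 = t0 then is_first_come_first_served trest d srest
      else
        match d with
        | d0 :: drest => if s0 = d0 then is_first_come_first_served (t0 :: trest) drest srest else false
        | [] => false
    | [], d0 :: drest => if s0 = d0 then is_first_come_first_served [] drest srest else false
    | [], [] => false

-- ===== PORT B =====
-- B's loop over served_orders with index pointers i (take-out) and j (dine-in);
-- `t[i]? = some o` is Python's `i < len(t) and o == t[i]`.
def fcfs_loop (t d : List Int) : List Int → Nat → Nat → Bool
  | [], _, _ => true
  | o :: rest, i, j =>
    if t[i]? = some o then fcfs_loop t d rest (i + 1) j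
    else if d[j]? = some o then fcfs_loop t d rest i (j + 1)
    else false

def is_first_come_first_served_alt (take_out_orders : List Int) (dine_in_orders : List Int) (served_orders : List Int) : Bool :=
  fcfs_loop take_out_orders dine_in_orders served_orders 0 0

-- ===== PRECONDITION & SPEC =====
def Spec_is_first_come_first_served (take_out_orders : List Int) (dine_in_orders : List Int) (served_orders : List Int) (out : Bool) : Prop := out = is_first_come_first_served_alt take_out_orders dine_in_orders served_orders
instance (take_out_orders : List Int) (dine_in_orders : List Int) (served_orders : List Int) (out : Bool) : Decidable (Spec_is_first_come_first_served take_out_orders dine_in_orders served_orders out) := by unfold Spec_is_first_come_first_served; infer_instance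

-- ===== CLAIM (what is proved, stated in full; the proofs are below) =====
def Claim_equal_is_first_come_first_served : Prop := ∀ (take_out_orders : List Int) (dine_in_orders : List Int) (served_orders : List Int), Dom_is_first_come_first_served take_out_orders dine_in_orders served_orders → Spec_is_first_come_first_served take_out_orders dine_in_orders served_orders (is_first_come_first_served take_out_orders dine_in_orders served_orders)

-- ===== LEMMAS AND PROOFS =====

-- The loop at pointers (i, j) computes A on the dropped suffixes.
theorem fcfs_loop_eq (t d : List Int) (s : List Int) :
    ∀ i j, fcfs_loop t d s i j = is_first_come_first_served (t.drop i) (d.drop j) s := by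
  induction s with
  | nil => intro i j; simp [fcfs_loop, is_first_come_first_served]
  | cons o rest ih =>
    intro i j
    have ht' : t[i]? = (t.drop i).head? := by
      rw [List.head?_drop]
    have hd' : d[j]? = (d.drop j).head? := by
      rw [List.head?_drop]
    have htt : t.drop (i + 1) = (t.drop i).tail := List.tail_drop.symm
    have hdt : d.drop (j + 1) = (d.drop j).tail := List.tail_drop.symm
    cases hdi : t.drop i with
    | nil =>
      cases hdj : d.drop j with
      | nil =>
        simp [fcfs_loop, is_first_come_first_served, ht', hd', hdi, hdj]
      | cons d0 drest =>
        by_cases h : o = d0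
        · subst h
          simp [fcfs_loop, is_first_come_first_served, ht', hd', hdi, hdj,
                ih, hdt]
        · simp [fcfs_loop, is_first_come_first_served, ht', hd', hdi, hdj, h,
                Ne.symm h]
    | cons t0 trest =>
      by_cases h : o = t0
      · subst h
        simp [fcfs_loop, is_first_come_first_served, ht', hdi, ih, htt]
      · cases hdj : d.drop j with
        | nil =>
          simp [fcfs_loop, is_first_come_first_served, ht', hd', hdi, hdj, h,
                Ne.symm h]
        | cons d0 drest =>
          by_cases h2 : o = d0
          · subst h2
            simp [fcfs_loop, is_first_come_first_served, ht', hd', hdi, hdj, h,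
                  Ne.symm h, ih, hdt]
          · simp [fcfs_loop, is_first_come_first_served, ht', hd', hdi, hdj, h,
                  Ne.symm h, h2, Ne.symm h2]

-- ===== VERDICT (by name: the statement is the Claim_ definition above) =====
theorem is_first_come_first_served_spec : Claim_equal_is_first_come_first_served := by
  intro t d s _
  unfold Spec_is_first_come_first_served is_first_come_first_served_alt
  rw [fcfs_loop_eq]
  simp
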